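-- pv_equiv track=rewrite | github.com/Zoe-life/study-material-automator | src/generators/flashcard_generator.py | create_spaced_repetition_schedule
-- ===== SOURCE A (Python) =====
-- from typing import Dict, List
--
-- def create_spaced_repetition_schedule(flashcards: List[Dict]) -> Dict:
--     """
--     Create a spaced repetition study schedule
--
--     Args:
--         flashcards: List of flashcards
--
--     Returns:
--         Dictionary with study schedule
--     """
--     # Simple spaced repetition: group by difficulty
--     schedule = {
--         'day_1': [],
--         'day_3': [],
--         'day_7': [],
--         'day_14': [],
--         'day_30': []
--     }
--
--     for card in flashcards:
--         difficulty = card.get('difficulty', 'medium')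
--         if difficulty == 'hard':
--             # Hard cards need more frequent review
--             schedule['day_1'].append(card)
--             schedule['day_3'].append(card)
--             schedule['day_7'].append(card)
--         elif difficulty == 'medium':
--             schedule['day_1'].append(card)
--             schedule['day_7'].append(card)
--             schedule['day_14'].append(card)
--         else:  # easy
--             schedule['day_1'].append(card)
--             schedule['day_14'].append(card)
--             schedule['day_30'].append(card)
--
--     return schedule
-- ===== SOURCE B (Python) =====
-- def create_spaced_repetition_schedule(flashcards):
--     """Create a spaced repetition study schedule (per-day filter formulation)."""
--     day_classes = {
--         'day_1': ('hard', 'medium', 'easy'),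
--         'day_3': ('hard',),
--         'day_7': ('hard', 'medium'),
--         'day_14': ('medium', 'easy'),
--         'day_30': ('easy',),
--     }
--
--     def classify(card):
--         d = card.get('difficulty', 'medium')
--         return d if d in ('hard', 'medium') else 'easy'
--
--     return {day: [c for c in flashcards if classify(c) in classes]
--             for day, classes in day_classes.items()}
-- ===== Notes on version B (the rewrite author's own statement) =====
-- stated objective: simpler
-- what changed: Replaces the per-card loop with three append branches by a data-driven inverse: each day bucket is produced by one filter over the flashcards using a difficulty-classification membership test against a day->difficulties table.
import Mathlib
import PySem

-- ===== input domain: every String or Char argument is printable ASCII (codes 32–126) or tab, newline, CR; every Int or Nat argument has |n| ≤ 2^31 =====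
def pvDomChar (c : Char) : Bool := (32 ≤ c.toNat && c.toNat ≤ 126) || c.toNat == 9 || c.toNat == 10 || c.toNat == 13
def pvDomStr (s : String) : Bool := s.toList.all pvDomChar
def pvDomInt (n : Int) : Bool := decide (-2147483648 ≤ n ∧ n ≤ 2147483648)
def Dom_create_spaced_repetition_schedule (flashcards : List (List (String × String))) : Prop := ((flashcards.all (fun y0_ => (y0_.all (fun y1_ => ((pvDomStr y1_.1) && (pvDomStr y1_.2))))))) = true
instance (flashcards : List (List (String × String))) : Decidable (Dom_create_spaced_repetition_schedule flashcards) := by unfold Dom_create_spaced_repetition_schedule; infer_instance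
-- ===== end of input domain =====

-- B replaces A's per-card loop with three append branches by a per-day filter over a
-- difficulty-classification table (objective: simpler, same O(n) cost).


-- ===== PORT A =====
-- card.get('difficulty', 'medium'): first-match lookup with default
def pvGetDifficulty (card : List (String × String)) : String :=
  PySem.Dict.getD (PySem.Dict.mk card) "difficulty" "medium"

-- literal port of A: one fold over the cards, three branches appending to the five buckets
def create_spaced_repetition_schedule (flashcards : List (List (String × String))) : List (String × List (List (String × String))) :=
  let s := flashcards.foldl
    (fun (sch : List (List (String × String)) × List (List (String × String)) ×
                List (List (String × String)) × List (List (String × String)) ×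
                List (List (String × String))) card =>
      let (d1, d3, d7, d14, d30) := sch
      let difficulty := pvGetDifficulty card
      if difficulty = "hard" then
        (d1 ++ [card], d3 ++ [card], d7 ++ [card], d14, d30)
      else if difficulty = "medium" then
        (d1 ++ [card], d3, d7 ++ [card], d14 ++ [card], d30)
      else
        (d1 ++ [card], d3, d7, d14 ++ [card], d30 ++ [card]))
    ([], [], [], [], [])
  [("day_1", s.1), ("day_3", s.2.1), ("day_7", s.2.2.1),
   ("day_14", s.2.2.2.1), ("day_30", s.2.2.2.2)]

-- ===== PORT B =====
-- classify: the effective difficulty class ('hard'/'medium', anything else -> 'easy')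
def pvClassify (card : List (String × String)) : String :=
  let d := pvGetDifficulty card
  if d = "hard" ∨ d = "medium" then d else "easy"

-- one bucket = one filter by membership of the class in the day's class list
def pvBucket (flashcards : List (List (String × String))) (classes : List String) : List (List (String × String)) :=
  flashcards.filter (fun c => classes.contains (pvClassify c))

-- literal port of B: per-day filter over the day -> classes table
def create_spaced_repetition_schedule_alt (flashcards : List (List (String × String))) : List (String × List (List (String × String))) :=
  [("day_1", pvBucket flashcards ["hard", "medium", "easy"]),
   ("day_3", pvBucket flashcards ["hard"]),
   ("day_7", pvBucket flashcards ["hard", "medium"]),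
   ("day_14", pvBucket flashcards ["medium", "easy"]),
   ("day_30", pvBucket flashcards ["easy"])]

-- ===== PRECONDITION & SPEC =====
def Spec_create_spaced_repetition_schedule (flashcards : List (List (String × String))) (out : List (String × List (List (String × String)))) : Prop := out = create_spaced_repetition_schedule_alt flashcards
instance (flashcards : List (List (String × String))) (out : List (String × List (List (String × String)))) : Decidable (Spec_create_spaced_repetition_schedule flashcards out) := by unfold Spec_create_spaced_repetition_schedule; infer_instance

-- ===== CLAIM (what is proved, stated in full; the proofs are below) =====
def Claim_equal_create_spaced_repetition_schedule : Prop := ∀ (flashcards : List (List (String × String))), Dom_create_spaced_repetition_schedule flashcards → Spec_create_spaced_repetition_schedule flashcards (create_spaced_repetition_schedule flashcards)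

-- ===== LEMMAS AND PROOFS =====

-- the fold invariant: each bucket accumulator extends by the corresponding filter
theorem pv_fold_inv (cards : List (List (String × String)))
    (a b c d e : List (List (String × String))) :
    cards.foldl
      (fun (sch : List (List (String × String)) × List (List (String × String)) ×
                  List (List (String × String)) × List (List (String × String)) ×
                  List (List (String × String))) card =>
        let (d1, d3, d7, d14, d30) := sch
        let difficulty := pvGetDifficulty card
        if difficulty = "hard" then
          (d1 ++ [card], d3 ++ [card], d7 ++ [card], d14, d30)
        else if difficulty = "medium" then
          (d1 ++ [card], d3, d7 ++ [card], d14 ++ [card], d30)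
        else
          (d1 ++ [card], d3, d7, d14 ++ [card], d30 ++ [card]))
      (a, b, c, d, e)
    = (a ++ pvBucket cards ["hard", "medium", "easy"],
       b ++ pvBucket cards ["hard"],
       c ++ pvBucket cards ["hard", "medium"],
       d ++ pvBucket cards ["medium", "easy"],
       e ++ pvBucket cards ["easy"]) := by
  induction cards generalizing a b c d e with
  | nil => simp [pvBucket]
  | cons card rest ih =>
    simp only [List.foldl_cons]
    by_cases hh : pvGetDifficulty card = "hard"
    · simp [hh, ih, pvBucket, pvClassify]
    · by_cases hm : pvGetDifficulty card = "medium"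
      · simp [hm, ih, pvBucket, pvClassify]
      · simp [hh, hm, ih, pvBucket, pvClassify]

-- ===== VERDICT (by name: the statement is the Claim_ definition above) =====
theorem create_spaced_repetition_schedule_spec : Claim_equal_create_spaced_repetition_schedule := by
  intro flashcards _
  unfold Spec_create_spaced_repetition_schedule
  unfold create_spaced_repetition_schedule create_spaced_repetition_schedule_alt
  simp [pv_fold_inv]
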